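-- pv_equiv track=rewrite | github.com/LeKSuS-04/Capture-The-Flag | 2021/НТО, 2-й этап/SOLVED amaze/ppc.py | calc_cell
-- ===== SOURCE A (Python) =====
-- def calc_cell(path: str):
--     v4, v5 = 0, 1
--     for letter in path:
--         if letter == 'D':
--             v4 += 1
--         if letter == 'L':
--             v5 -= 1
--         if letter == 'R':
--             v5 += 1
--         if letter == 'U':
--             v4 -= 1
--     return v4, v5
-- ===== SOURCE B (Python) =====
-- def calc_cell(path: str):
--     down = path.count('D')
--     up = path.count('U')
--     left = path.count('L')
--     right = path.count('R')
--     return down - up, 1 + right - left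
-- ===== Notes on version B (the rewrite author's own statement) =====
-- stated objective: simpler
-- what changed: Replaced the single incremental loop with four if-branches by a closed-form expression over aggregate str.count frequencies of each direction.
import Mathlib
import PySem

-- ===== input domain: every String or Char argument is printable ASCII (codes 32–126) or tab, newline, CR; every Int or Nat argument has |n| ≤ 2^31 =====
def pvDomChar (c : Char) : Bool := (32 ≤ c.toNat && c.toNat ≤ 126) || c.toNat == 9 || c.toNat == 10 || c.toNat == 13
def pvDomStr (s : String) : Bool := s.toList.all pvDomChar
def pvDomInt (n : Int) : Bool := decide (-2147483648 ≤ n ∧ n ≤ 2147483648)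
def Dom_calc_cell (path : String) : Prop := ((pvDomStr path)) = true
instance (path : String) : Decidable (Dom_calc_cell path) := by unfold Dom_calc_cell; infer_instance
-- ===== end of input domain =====

-- B replaces A's single incremental loop by a closed-form expression over the
-- four direction frequencies obtained with str.count (objective: simpler).

-- ===== PORT A =====
def calc_cell (path : String) : Int × Int :=
  path.toList.foldl (fun (st : Int × Int) letter =>
    let v4 := st.1
    let v5 := st.2
    let v4 := if letter == 'D' then v4 + 1 else v4
    let v5 := if letter == 'L' then v5 - 1 else v5
    let v5 := if letter == 'R' then v5 + 1 else v5
    let v4 := if letter == 'U' then v4 - 1 else v4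
    (v4, v5)) (0, 1)

-- ===== PORT B =====
def calc_cell_alt (path : String) : Int × Int :=
  let down : Int := PySem.Str.count path "D"
  let up : Int := PySem.Str.count path "U"
  let left : Int := PySem.Str.count path "L"
  let right : Int := PySem.Str.count path "R"
  (down - up, 1 + right - left)

-- ===== PRECONDITION & SPEC =====
def Spec_calc_cell (path : String) (out : Int × Int) : Prop := out = calc_cell_alt path
instance (path : String) (out : Int × Int) : Decidable (Spec_calc_cell path out) := by unfold Spec_calc_cell; infer_instance

-- ===== CLAIM (what is proved, stated in full; the proofs are below) =====
def Claim_equal_calc_cell : Prop := ∀ (path : String), Dom_calc_cell path → Spec_calc_cell path (calc_cell path)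

-- ===== LEMMAS AND PROOFS =====

-- Chars.count.go with a single-character needle counts that character in the first `fuel` characters.
theorem pv_count_go_singleton (c : Char) (l : List Char) : ∀ (fuel acc : Nat),
    PySem.Chars.count.go [c] fuel l acc = acc + (l.take fuel).count c := by
  induction l with
  | nil => intro fuel acc; cases fuel <;> simp [PySem.Chars.count.go]
  | cons h t ih =>
    intro fuel acc
    cases fuel with
    | zero => simp [PySem.Chars.count.go]
    | succ n =>
      by_cases hc : h = c
      · simp [PySem.Chars.count.go, hc, List.isPrefixOf, ih]
        omega
      · have : ([c].isPrefixOf (h :: t)) = false := by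
          simp [List.isPrefixOf]; exact fun e => hc e.symm
        simp [PySem.Chars.count.go, this, ih, hc]

-- Str.count with a one-character needle is List.count on the character list.
theorem pv_chars_count_char (l : List Char) (c : Char) :
    PySem.Chars.count l [c] = l.count c := by
  simp [PySem.Chars.count, pv_count_go_singleton]

-- Loop invariant: A's fold from any start (a, b) adds the direction-count balances.
theorem pv_fold_closed (l : List Char) : ∀ (a b : Int),
    l.foldl (fun (st : Int × Int) letter =>
      let v4 := st.1
      let v5 := st.2
      let v4 := if letter == 'D' then v4 + 1 else v4
      let v5 := if letter == 'L' then v5 - 1 else v5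
      let v5 := if letter == 'R' then v5 + 1 else v5
      let v4 := if letter == 'U' then v4 - 1 else v4
      (v4, v5)) (a, b)
    = (a + l.count 'D' - l.count 'U', b + l.count 'R' - l.count 'L') := by
  induction l with
  | nil => intro a b; simp
  | cons h t ih =>
    intro a b
    rw [List.foldl_cons]
    show List.foldl _ (_, _) t = _
    rw [ih]
    simp only [List.count_cons, beq_iff_eq, Prod.mk.injEq]
    rcases Decidable.em (h = 'D') with hD | hD <;>
    rcases Decidable.em (h = 'L') with hL | hL <;>
    rcases Decidable.em (h = 'R') with hR | hR <;>
    rcases Decidable.em (h = 'U') with hU | hU <;>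
      simp_all <;> omega

-- ===== VERDICT (by name: the statement is the Claim_ definition above) =====
theorem calc_cell_spec : Claim_equal_calc_cell := by
  intro path _
  unfold Spec_calc_cell calc_cell calc_cell_alt
  rw [pv_fold_closed]
  simp only [PySem.Str.count_eq]
  simp only [show ("D":String).toList = ['D'] from rfl, show ("U":String).toList = ['U'] from rfl,
             show ("L":String).toList = ['L'] from rfl, show ("R":String).toList = ['R'] from rfl,
             pv_chars_count_char]
  rw [Prod.mk.injEq]
  constructor <;> ring
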